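-- pv_equiv track=rewrite | github.com/postvakje/oeis-sequences | oeis-sequences/OEISsequences.py | A047842
-- ===== SOURCE A (Python) =====
-- def A047842(n):
--     s, x = "", str(n)
--     for i in range(10):
--         y = str(i)
--         c = str(x.count(y))
--         if c != "0":
--             s += c + y
--     return int(s)
-- ===== SOURCE B (Python) =====
-- def A047842(n):
--     digits = sorted(c for c in str(n) if c.isdigit())
--     def rle(lst):
--         if not lst:
--             return ""
--         c = lst[0]
--         k = 1
--         while k < len(lst) and lst[k] == c:
--             k += 1
--         return str(k) + c + rle(lst[k:])
--     return int(rle(digits))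
-- ===== Notes on version B (the rewrite author's own statement) =====
-- stated objective: alternative
-- what changed: B sorts the digit characters of str(n) and run-length encodes the sorted list (count+digit per run), instead of A's ten separate str.count scans over digits 0..9.
import Mathlib
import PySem

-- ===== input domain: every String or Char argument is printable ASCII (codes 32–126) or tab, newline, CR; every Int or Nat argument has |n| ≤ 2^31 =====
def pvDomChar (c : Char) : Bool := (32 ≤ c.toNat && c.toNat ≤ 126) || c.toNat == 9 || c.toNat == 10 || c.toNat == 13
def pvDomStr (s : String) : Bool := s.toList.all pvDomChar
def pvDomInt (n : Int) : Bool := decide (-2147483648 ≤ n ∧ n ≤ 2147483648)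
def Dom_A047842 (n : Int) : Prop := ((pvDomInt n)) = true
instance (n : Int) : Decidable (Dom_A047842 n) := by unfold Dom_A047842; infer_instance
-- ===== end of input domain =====

-- B sorts the digit characters of str(n) and run-length encodes the sorted list,
-- replacing A's ten per-digit str.count scans (objective: alternative algorithm).

-- ===== PORT A =====
-- int(s) at the end: s is always a nonempty digit string there (str(n) contains at
-- least one digit, whose count line is emitted), so ofStr? is some and getD 0 is never used.
def A047842 (n : Int) : Int :=
  let x := PySem.Int.toStr n
  let s := (PySem.List.pyRange 0 10 1).foldl (fun s i =>
    let y := PySem.Int.toStr i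
    let c := PySem.Int.toStr ((PySem.Str.count x y : Nat) : Int)
    if c ≠ "0" then s ++ c ++ y else s) ""
  (PySem.Int.ofStr? s).getD 0

-- ===== PORT B =====
-- Source B's inner while loop scans the run of elements equal to lst[0]: k - 1 leading
-- equal elements of the tail = takeWhile, lst[k:] = dropWhile of the tail.
def A047842_rle : List Char → String
  | [] => ""
  | c :: t =>
      PySem.Int.toStr ((1 + (t.takeWhile (fun x => x == c)).length : Nat) : Int)
        ++ String.ofList [c] ++ A047842_rle (t.dropWhile (fun x => x == c))
termination_by l => l.length
decreasing_by
  simpa using Nat.lt_succ_of_le (List.length_dropWhile_le _ t)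

-- same remark on the final int(...) as in port A.
def A047842_alt (n : Int) : Int :=
  let digits := PySem.List.sorted
    ((PySem.Int.toStr n).toList.filter (fun c => PySem.Chars.isdigit c)) (fun x => x) false
  (PySem.Int.ofStr? (A047842_rle digits)).getD 0

-- ===== PRECONDITION & SPEC =====
def Spec_A047842 (n : Int) (out : Int) : Prop := out = A047842_alt n
instance (n : Int) (out : Int) : Decidable (Spec_A047842 n out) := by unfold Spec_A047842; infer_instance

-- ===== CLAIM (what is proved, stated in full; the proofs are below) =====
def Claim_equal_A047842 : Prop := ∀ (n : Int), Dom_A047842 n → Spec_A047842 n (A047842 n)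

-- ===== LEMMAS AND PROOFS =====

-- Python str.count with a single-character needle is the plain character count.
theorem count_go_single (c : Char) : ∀ (cs : List Char) (acc fuel : Nat),
    cs.length ≤ fuel → PySem.Chars.count.go [c] fuel cs acc = acc + cs.count c := by
  intro cs
  induction cs with
  | nil =>
    intro acc fuel _
    cases fuel <;> simp [PySem.Chars.count.go]
  | cons h t ih =>
    intro acc fuel hle
    cases fuel with
    | zero => simp at hle
    | succ f =>
      simp only [List.length_cons] at hle
      by_cases hc : c = h
      · subst hc
        simp [PySem.Chars.count.go, List.isPrefixOf, ih (acc + 1) f (by omega),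
          List.count_cons_self]
        omega
      · have hne : (c == h) = false := by simp [hc]
        simp [PySem.Chars.count.go, List.isPrefixOf, hne, ih acc f (by omega),
          List.count_cons_of_ne (by simpa using Ne.symm hc)]

theorem count_single (s : String) (c : Char) :
    PySem.Str.count s (String.ofList [c]) = s.toList.count c := by
  rw [PySem.Str.count_eq]
  have h : (String.ofList [c]).toList = [c] := by simp
  rw [h]
  have h2 := count_go_single c s.toList 0 s.toList.length le_rfl
  simp only [PySem.Chars.count]
  simpa using h2

theorem toStr_len_le (n : Int) (h : Dom_A047842 n) : (PySem.Int.toStr n).toList.length ≤ 11 := by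
  unfold Dom_A047842 pvDomInt at h
  simp only [decide_eq_true_eq] at h
  rw [PySem.Int.toList_toStr]
  unfold PySem.Int.toChars
  have hd : ∀ m : Nat, m < 10 ^ 10 → (Nat.toDigits 10 m).length ≤ 10 := by
    intro m hm
    exact Nat.toDigits_length 10 m 10 (by norm_num) hm
  split
  · simp only [List.length_cons]
    have : n.natAbs < 10 ^ 10 := by omega
    have := hd n.natAbs this
    omega
  · have : n.toNat < 10 ^ 10 := by omega
    have := hd n.toNat this
    omega

theorem toStr_cast_eq_zero_iff (k : Nat) (h : k ≤ 11) :
    (PySem.Int.toStr (k : Int) = "0") ↔ k = 0 := by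
  interval_cases k <;> simp <;> decide

-- one A-side loop step rewritten into the digit-character form with the sorted list's count
theorem stepA (x : String) (s : String) (i : Int) (c : Char)
    (ds : List Char) (hi : PySem.Int.toStr i = String.ofList [c])
    (hcnt : x.toList.count c = ds.count c) (hds : ds.count c ≤ 11) :
    (if PySem.Int.toStr ((PySem.Str.count x (PySem.Int.toStr i) : Nat) : Int) ≠ "0"
       then s ++ PySem.Int.toStr ((PySem.Str.count x (PySem.Int.toStr i) : Nat) : Int)
              ++ PySem.Int.toStr i
       else s)
    = (if ds.count c ≠ 0
         then s ++ PySem.Int.toStr ((ds.count c : Nat) : Int) ++ String.ofList [c]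
         else s) := by
  rw [hi, count_single, hcnt]
  by_cases h0 : ds.count c = 0
  · rw [if_neg (not_not_intro ((toStr_cast_eq_zero_iff _ hds).mpr h0)),
      if_neg (not_not_intro h0)]
  · rw [if_pos (fun he => h0 ((toStr_cast_eq_zero_iff _ hds).mp he)), if_pos h0]

-- in a sorted list bounded below by a, the a's are exactly the leading run
theorem sorted_run (a : Char) : ∀ (ds : List Char), ds.Pairwise (· ≤ ·) →
    (∀ x ∈ ds, a ≤ x) →
    ds.takeWhile (fun x => x == a) = List.replicate (ds.count a) a ∧
    (∀ x ∈ ds.dropWhile (fun x => x == a), a < x) := by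
  intro ds
  induction ds with
  | nil => intro _ _; simp
  | cons h t ih =>
    intro hp hlb
    have hpt : t.Pairwise (· ≤ ·) := hp.of_cons
    have hht : ∀ x ∈ t, h ≤ x := fun x hx => List.rel_of_pairwise_cons hp hx
    by_cases hha : h = a
    · subst hha
      have := ih hpt hht
      constructor
      · simp [List.count_cons_self, List.replicate_succ, this.1]
      · simpa [List.dropWhile_cons] using this.2
    · have hlt : a < h := lt_of_le_of_ne (hlb h (by simp)) (Ne.symm hha)
      have hnot : ∀ x ∈ h :: t, a < x := by
        intro x hx
        rcases List.mem_cons.mp hx with rfl | hx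
        · exact hlt
        · exact lt_of_lt_of_le hlt (hht x hx)
      have hcz : (h :: t).count a = 0 := by
        rw [List.count_eq_zero]
        intro hmem
        exact absurd rfl (ne_of_gt (hnot a hmem))
      have hne : (h == a) = false := by simp [hha]
      refine ⟨?_, ?_⟩
      · simp [hne, hcz]
      · simpa [List.dropWhile_cons, hne] using hnot

-- run-length encoding of a sorted list over a strictly increasing alphabet equals
-- the per-letter "count then emit" fold of A
theorem rle_eq_fold : ∀ (al : List Char), al.Pairwise (· < ·) →
    ∀ (ds : List Char) (acc : String), ds.Pairwise (· ≤ ·) → (∀ x ∈ ds, x ∈ al) →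
    acc ++ A047842_rle ds =
      al.foldl (fun s c => if ds.count c ≠ 0
        then s ++ PySem.Int.toStr ((ds.count c : Nat) : Int) ++ String.ofList [c]
        else s) acc := by
  intro al
  induction al with
  | nil =>
    intro _ ds acc _ hmem
    have : ds = [] := by
      cases ds with
      | nil => rfl
      | cons h t => exact absurd (hmem h (by simp)) (by simp)
    subst this
    simp [A047842_rle]
  | cons a rest ih =>
    intro hal ds acc hsorted hmem
    have halr : rest.Pairwise (· < ·) := hal.of_cons
    have har : ∀ x ∈ rest, a < x := fun x hx => List.rel_of_pairwise_cons hal hx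
    have hlb : ∀ x ∈ ds, a ≤ x := by
      intro x hx
      rcases List.mem_cons.mp (hmem x hx) with rfl | hx'
      · exact le_refl x
      · exact le_of_lt (har x hx')
    by_cases h0 : ds.count a = 0
    · -- a does not occur: the fold skips a, rle starts past no a's
      have hmem' : ∀ x ∈ ds, x ∈ rest := by
        intro x hx
        rcases List.mem_cons.mp (hmem x hx) with rfl | hx'
        · exact absurd hx (List.count_eq_zero.mp h0)
        · exact hx'
      simp only [List.foldl_cons, if_neg (not_not_intro h0)]
      exact ih halr ds acc hsorted hmem'
    · -- ds = a :: t : the head of the sorted list is its minimum a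
      cases ds with
      | nil => simp [List.count_nil] at h0
      | cons h t =>
        have hht : ∀ x ∈ t, h ≤ x := fun x hx => List.rel_of_pairwise_cons hsorted hx
        have hha : h = a := by
          have ha_mem : a ∈ h :: t := List.count_pos_iff.mp (Nat.pos_of_ne_zero h0)
          have h1 : a ≤ h := hlb h (by simp)
          rcases List.mem_cons.mp ha_mem with rfl | hx
          · rfl
          · exact le_antisymm (hht a hx) h1
        subst hha
        have hpt : t.Pairwise (· ≤ ·) := hsorted.of_cons
        have hlbt : ∀ x ∈ t, h ≤ x := hht
        obtain ⟨htake, hdrop⟩ := sorted_run h t hpt hlbt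
        set ds' := t.dropWhile (fun x => x == h) with hds'
        have hcount : (h :: t).count h = 1 + t.count h := by
          simp [List.count_cons_self]; omega
        have htlen : (t.takeWhile (fun x => x == h)).length = t.count h := by
          rw [htake]; simp
        -- counts of every letter of rest agree between ds and ds'
        have hsplit : t = List.replicate (t.count h) h ++ ds' := by
          conv_lhs => rw [← List.takeWhile_append_dropWhile (p := fun x => x == h) (l := t)]
          rw [htake]
        have hcnt' : ∀ c ∈ rest, (h :: t).count c = ds'.count c := by
          intro c hc
          have hch : c ≠ h := ne_of_gt (har c hc)
          rw [List.count_cons_of_ne (Ne.symm hch), hsplit, List.count_append,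
            List.count_replicate, if_neg (by simpa using Ne.symm hch)]
          simp
        have hmem' : ∀ x ∈ ds', x ∈ rest := by
          intro x hx
          have hxds : x ∈ h :: t := by
            have : x ∈ t := (List.dropWhile_sublist _).subset hx
            exact List.mem_cons_of_mem _ this
          rcases List.mem_cons.mp (hmem x hxds) with rfl | hx'
          · exact absurd rfl (ne_of_gt (hdrop x hx))
          · exact hx'
        have hsorted' : ds'.Pairwise (· ≤ ·) := hpt.sublist (List.dropWhile_sublist _)
        -- unfold one rle step and one fold step
        have hrle : A047842_rle (h :: t) =
            PySem.Int.toStr (((h :: t).count h : Nat) : Int) ++ String.ofList [h]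
              ++ A047842_rle ds' := by
          rw [A047842_rle, htlen, ← hcount]
        rw [hrle, List.foldl_cons, if_pos h0]
        have hfold := ih halr ds'
          (acc ++ PySem.Int.toStr (((h :: t).count h : Nat) : Int) ++ String.ofList [h])
          hsorted' hmem'
        rw [← String.append_assoc, ← String.append_assoc, hfold]
        exact PySem.List.foldl_congr_mem _ _ _ _
          (fun s c hc => by rw [hcnt' c hc])

-- every digit character is one of '0'..'9'
theorem isdigit_mem (c : Char) (h : PySem.Chars.isdigit c = true) :
    c ∈ ['0','1','2','3','4','5','6','7','8','9'] := by
  simp only [PySem.Chars.isdigit, Bool.and_eq_true, decide_eq_true_eq] at h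
  obtain ⟨h1, h2⟩ := h
  rcases c with ⟨⟨⟨⟨v, hv⟩⟩⟩, hval⟩
  simp only [Char.le_def, UInt32.le_iff_toNat_le] at h1 h2
  have hb1 : 48 ≤ v := by simpa using h1
  have hb2 : v ≤ 57 := by simpa using h2
  interval_cases v <;> simp only [List.mem_cons] <;>
    (repeat' first | exact Or.inl rfl | apply Or.inr)

-- ===== VERDICT (by name: the statement is the Claim_ definition above) =====
theorem A047842_spec : Claim_equal_A047842 := by
  intro n hdom
  unfold Spec_A047842 A047842 A047842_alt
  have hx := toStr_len_le n hdom
  set x := PySem.Int.toStr n with hxdef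
  set ds := PySem.List.sorted (x.toList.filter (fun c => PySem.Chars.isdigit c))
    (fun x => x) false with hdsdef
  have hperm : ds.Perm (x.toList.filter (fun c => PySem.Chars.isdigit c)) :=
    PySem.List.sorted_perm _ _ _
  have hcnt : ∀ c : Char, PySem.Chars.isdigit c = true → x.toList.count c = ds.count c := by
    intro c hc
    rw [hperm.count_eq, List.count_filter hc]
  have hdbound : ∀ c : Char, ds.count c ≤ 11 := by
    intro c
    calc ds.count c ≤ ds.length := List.count_le_length
      _ ≤ x.toList.length := by
          rw [hperm.length_eq]; exact List.length_filter_le _ _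
      _ ≤ 11 := hx
  have hsorted : ds.Pairwise (· ≤ ·) := by
    have := PySem.List.sorted_pairwise (x.toList.filter (fun c => PySem.Chars.isdigit c))
      (fun x => x)
    simpa [← hdsdef] using this
  have hmem : ∀ c ∈ ds, c ∈ ['0','1','2','3','4','5','6','7','8','9'] := by
    intro c hc
    have : c ∈ x.toList.filter (fun c => PySem.Chars.isdigit c) := hperm.mem_iff.mp hc
    exact isdigit_mem c (List.of_mem_filter this)
  have key := rle_eq_fold ['0','1','2','3','4','5','6','7','8','9'] (by decide)
    ds "" hsorted hmem
  simp only [show PySem.List.pyRange 0 10 1 = [0,1,2,3,4,5,6,7,8,9] from by decide,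
    List.foldl]
  rw [stepA x _ 0 '0' ds (by decide) (hcnt '0' (by decide)) (hdbound '0'),
    stepA x _ 1 '1' ds (by decide) (hcnt '1' (by decide)) (hdbound '1'),
    stepA x _ 2 '2' ds (by decide) (hcnt '2' (by decide)) (hdbound '2'),
    stepA x _ 3 '3' ds (by decide) (hcnt '3' (by decide)) (hdbound '3'),
    stepA x _ 4 '4' ds (by decide) (hcnt '4' (by decide)) (hdbound '4'),
    stepA x _ 5 '5' ds (by decide) (hcnt '5' (by decide)) (hdbound '5'),
    stepA x _ 6 '6' ds (by decide) (hcnt '6' (by decide)) (hdbound '6'),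
    stepA x _ 7 '7' ds (by decide) (hcnt '7' (by decide)) (hdbound '7'),
    stepA x _ 8 '8' ds (by decide) (hcnt '8' (by decide)) (hdbound '8'),
    stepA x _ 9 '9' ds (by decide) (hcnt '9' (by decide)) (hdbound '9')]
  rw [show ("" : String) ++ A047842_rle ds = A047842_rle ds from by simp] at key
  simp only [List.foldl] at key
  rw [key]
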